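-- pv_equiv track=rewrite | github.com/anyashishkina/python_tasks | ege/tests/march_v1/23.py | F
-- ===== SOURCE A (Python) =====
-- def F(ns, nf):
--     if ns == nf:
--         return 1
--     if ns > nf:
--         return 0
--     if ns == 33:
--         return 0
--     return F(ns + 1, nf) + F(ns * 2, nf) + F(ns * 3, nf)
-- ===== SOURCE B (Python) =====
-- def F(ns, nf):
--     # Bottom-up dynamic programming over states ns..nf instead of naive exponential recursion.
--     if ns == nf:
--         return 1
--     if ns > nf:
--         return 0
--     dp = {nf: 1}
--     n = nf - 1
--     while n >= ns:
--         dp[n] = 0 if n == 33 else dp.get(n + 1, 0) + dp.get(2 * n, 0) + dp.get(3 * n, 0)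
--         n -= 1
--     return dp[ns]
-- ===== Notes on version B (the rewrite author's own statement) =====
-- stated objective: faster
-- what changed: Replaced the naive triple-branching recursion by an iterative bottom-up dynamic-programming table filled from nf down to ns, so each state is computed once.
import Mathlib
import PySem

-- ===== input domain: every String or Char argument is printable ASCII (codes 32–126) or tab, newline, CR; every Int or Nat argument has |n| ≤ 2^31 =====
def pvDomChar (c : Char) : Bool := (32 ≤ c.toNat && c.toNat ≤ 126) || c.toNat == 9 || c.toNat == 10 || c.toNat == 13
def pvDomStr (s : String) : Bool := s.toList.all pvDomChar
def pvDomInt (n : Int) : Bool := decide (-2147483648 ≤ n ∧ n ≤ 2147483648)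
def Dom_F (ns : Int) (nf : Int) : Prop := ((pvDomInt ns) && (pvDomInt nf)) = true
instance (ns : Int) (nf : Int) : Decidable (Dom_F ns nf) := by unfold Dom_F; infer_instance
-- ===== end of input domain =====

-- B replaces A's exponential triple recursion by a bottom-up DP loop from nf down to ns (asymptotically faster, in a timing run).

-- ===== PORT A =====
-- A's recursion, with fuel: on Pre_F (ns ≥ 1 or ns ≥ nf) the recursion depth is at most
-- (nf - ns).toNat, so the fuel never runs out there; outside Pre_F the Python A diverges
-- (RecursionError) and is excluded by Pre_F.
def FRec : Nat → Int → Int → Int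
  | 0, _, _ => 0
  | fuel + 1, ns, nf =>
    if ns = nf then 1
    else if ns > nf then 0
    else if ns = 33 then 0
    else FRec fuel (ns + 1) nf + FRec fuel (ns * 2) nf + FRec fuel (ns * 3) nf

def F (ns : Int) (nf : Int) : Int := FRec ((nf - ns).toNat + 1) ns nf

-- ===== PORT B =====
-- the while loop of Source B: n counts down from nf-1 to ns, fuel = number of iterations
def FLoop : Nat → Int → Int → Int → PySem.Dict Int Int → PySem.Dict Int Int
  | 0, _, _, _, d => d
  | fuel + 1, ns, n, nf, d =>
    if n ≥ ns then
      FLoop fuel ns (n - 1) nf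
        (d.insert n (if n = 33 then 0 else d.getD (n + 1) 0 + d.getD (2 * n) 0 + d.getD (3 * n) 0))
    else d

def F_alt (ns : Int) (nf : Int) : Int :=
  if ns = nf then 1
  else if ns > nf then 0
  else
    -- dp[ns]: the key is always present after the loop (exact: n descends through ns)
    ((FLoop (nf - ns).toNat ns (nf - 1) nf (PySem.Dict.insert PySem.Dict.empty nf 1)).get? ns).getD 0

-- ===== PRECONDITION & SPEC =====
-- Pre_F excludes exactly the inputs on which the Python A never returns: for ns ≤ 0 with
-- ns < nf the call F(ns*2, nf) (and F(ns*3, nf)) does not make progress and A raises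
-- RecursionError.
def Pre_F (ns : Int) (nf : Int) : Prop := 1 ≤ ns ∨ nf ≤ ns
instance (ns : Int) (nf : Int) : Decidable (Pre_F ns nf) := by unfold Pre_F; infer_instance
def pvWitness_F : Int × Int := (1, 10)

def Spec_F (ns : Int) (nf : Int) (out : Int) : Prop := out = F_alt ns nf
instance (ns : Int) (nf : Int) (out : Int) : Decidable (Spec_F ns nf out) := by unfold Spec_F; infer_instance

-- ===== CLAIM (what is proved, stated in full; the proofs are below) =====
def Claim_equal_F : Prop := ∀ (ns : Int) (nf : Int), Dom_F ns nf → Pre_F ns nf → Spec_F ns nf (F ns nf)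

-- ===== LEMMAS AND PROOFS =====

-- mathematical reference function: number of paths, well-founded on (nf - n).toNat
def G (n : Int) (nf : Int) : Int :=
  if _h : 1 ≤ n ∧ n < nf then
    if n = 33 then 0 else G (n + 1) nf + G (n * 2) nf + G (n * 3) nf
  else if n = nf then 1 else 0
termination_by (nf - n).toNat
decreasing_by
  · omega
  · omega
  · omega

theorem G_of_not_lt {n nf : Int} (h : ¬ (1 ≤ n ∧ n < nf)) :
    G n nf = if n = nf then 1 else 0 := by
  rw [G, dif_neg h]

theorem G_of_lt {n nf : Int} (h1 : 1 ≤ n) (h2 : n < nf) :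
    G n nf = if n = 33 then 0 else G (n + 1) nf + G (n * 2) nf + G (n * 3) nf := by
  rw [G]; simp [h1, h2]

-- A's fuel recursion computes G whenever the fuel exceeds nf - ns and Pre_F holds
theorem FRec_eq_G : ∀ (fuel : Nat) (ns nf : Int), (1 ≤ ns ∨ nf ≤ ns) →
    (nf - ns).toNat < fuel → FRec fuel ns nf = G ns nf := by
  intro fuel
  induction fuel with
  | zero => intro ns nf _ h; omega
  | succ fuel ih =>
    intro ns nf hpre hfuel
    rw [FRec]
    by_cases h1 : ns = nf
    · rw [if_pos h1, G_of_not_lt (show ¬ (1 ≤ ns ∧ ns < nf) by omega), if_pos h1]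
    · by_cases h2 : ns > nf
      · rw [if_neg h1, if_pos h2, G_of_not_lt (show ¬ (1 ≤ ns ∧ ns < nf) by omega), if_neg h1]
      · have hns : 1 ≤ ns := by omega
        have hlt : ns < nf := by omega
        by_cases h3 : ns = 33
        · rw [if_neg h1, if_neg h2, if_pos h3, G_of_lt hns hlt, if_pos h3]
        · rw [if_neg h1, if_neg h2, if_neg h3]
          rw [ih (ns + 1) nf (by omega) (by omega),
              ih (ns * 2) nf (by omega) (by omega),
              ih (ns * 3) nf (by omega) (by omega),
              G_of_lt hns hlt]
          simp [h3]

-- loop invariant: after the countdown has processed all n' with lo ≤ n' ≤ nf - 1,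
-- the dict holds exactly G on [lo, nf]
def DPInv (lo nf : Int) (d : PySem.Dict Int Int) : Prop :=
  ∀ k : Int, d.get? k = if lo ≤ k ∧ k ≤ nf then some (G k nf) else none

theorem FLoop_inv : ∀ (fuel : Nat) (ns n nf : Int) (d : PySem.Dict Int Int),
    1 ≤ ns → n < nf → (n - ns + 1).toNat ≤ fuel → DPInv (n + 1) nf d →
    DPInv (min ns (n + 1)) nf (FLoop fuel ns n nf d) := by
  intro fuel
  induction fuel with
  | zero =>
    intro ns n nf d hns hlt hfuel hinv
    rw [FLoop]
    have : min ns (n + 1) = n + 1 := by omega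
    rw [this]; exact hinv
  | succ fuel ih =>
    intro ns n nf d hns hlt hfuel hinv
    rw [FLoop]
    by_cases hge : n ≥ ns
    · simp only [hge, if_true]
      have hn1 : 1 ≤ n := by omega
      -- the freshly computed value equals G n nf
      have hv : (if n = 33 then 0 else d.getD (n + 1) 0 + d.getD (2 * n) 0 + d.getD (3 * n) 0)
          = G n nf := by
        rw [G_of_lt hn1 hlt]
        by_cases h33 : n = 33
        · simp [h33]
        · simp only [h33, if_false]
          have g1 : d.getD (n + 1) 0 = G (n + 1) nf := by
            rw [PySem.Dict.getD_eq_get?_getD, hinv]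
            simp [show n + 1 ≤ n + 1 ∧ n + 1 ≤ nf by omega]
          have g2 : d.getD (2 * n) 0 = G (n * 2) nf := by
            rw [PySem.Dict.getD_eq_get?_getD, hinv, show (2 * n : Int) = n * 2 by ring]
            by_cases h2n : n * 2 ≤ nf
            · rw [if_pos ⟨by omega, h2n⟩]; rfl
            · rw [if_neg (by omega),
                  G_of_not_lt (show ¬ (1 ≤ n * 2 ∧ n * 2 < nf) by omega),
                  if_neg (by omega)]
              rfl
          have g3 : d.getD (3 * n) 0 = G (n * 3) nf := by
            rw [PySem.Dict.getD_eq_get?_getD, hinv, show (3 * n : Int) = n * 3 by ring]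
            by_cases h3n : n * 3 ≤ nf
            · rw [if_pos ⟨by omega, h3n⟩]; rfl
            · rw [if_neg (by omega),
                  G_of_not_lt (show ¬ (1 ≤ n * 3 ∧ n * 3 < nf) by omega),
                  if_neg (by omega)]
              rfl
          rw [g1, g2, g3]
      rw [hv]
      have hinv' : DPInv ((n - 1) + 1) nf (d.insert n (G n nf)) := by
        intro k
        rw [PySem.Dict.get?_insert]
        by_cases hk : k = n
        · simp [hk, show n - 1 + 1 ≤ n ∧ n ≤ nf by omega]
        · rw [if_neg hk, hinv k]
          by_cases hk2 : n + 1 ≤ k ∧ k ≤ nf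
          · rw [if_pos hk2, if_pos (show n - 1 + 1 ≤ k ∧ k ≤ nf by omega)]
          · simp only [hk2, if_false]
            rw [if_neg (by omega)]
      have hres := ih ns (n - 1) nf _ hns (by omega) (by omega) hinv'
      have hm : min ns (n - 1 + 1) = min ns (n + 1) := by omega
      rwa [hm] at hres
    · simp only [hge, if_false]
      have : min ns (n + 1) = n + 1 := by omega
      rw [this]; exact hinv

theorem F_eq_F_alt (ns nf : Int) (hpre : Pre_F ns nf) : F ns nf = F_alt ns nf := by
  unfold F F_alt
  by_cases h1 : ns = nf
  · rw [FRec]; simp [h1]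
  · by_cases h2 : ns > nf
    · rw [FRec]; simp [h1, h2]
    · have hns : 1 ≤ ns := by rcases hpre with h | h; exact h; omega
      have hlt : ns < nf := by omega
      rw [if_neg h1, if_neg h2]
      have hA : FRec ((nf - ns).toNat + 1) ns nf = G ns nf :=
        FRec_eq_G _ ns nf (Or.inl hns) (by omega)
      have hinv0 : DPInv ((nf - 1) + 1) nf (PySem.Dict.insert PySem.Dict.empty nf 1) := by
        intro k
        rw [PySem.Dict.get?_insert]
        by_cases hk : k = nf
        · rw [if_pos hk, if_pos (by omega)]
          rw [G_of_not_lt (by omega)]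
          simp [hk]
        · rw [if_neg hk, PySem.Dict.get?_empty, if_neg (by omega)]
      have hres := FLoop_inv (nf - ns).toNat ns (nf - 1) nf _ hns (by omega) (by omega) hinv0
      have hm : min ns (nf - 1 + 1) = ns := by omega
      rw [hm] at hres
      rw [hA, hres ns, if_pos (by omega)]
      rfl

-- ===== VERDICT (by name: the statement is the Claim_ definition above) =====
theorem F_spec : Claim_equal_F := by
  intro ns nf _ hpre
  unfold Spec_F
  exact F_eq_F_alt ns nf hpre
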